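-- pv_equiv track=rewrite | github.com/brokenarc/designtools | src/old_swatch_extractor.py | make_svg_rects
-- ===== SOURCE A (Python) =====
-- from collections.abc import Iterable
--
-- SWATCH_ROW = 8
--
-- SWATCH_SIZE = 32
--
-- RECT_TEMPLATE = '<rect x="{x}" y="{y}" width="{width}" ' + \
--     'height="{height}" stroke="none" fill="{color}"/>'
--
-- def make_svg_rects(colors: Iterable[str]) -> Iterable[str]:
--     """Creates a list of SVG rectangle elements as strings."""
--     rects = []
--     col = 0
--     row = 0
--     for color in colors:
--         rects.append(
--             RECT_TEMPLATE.format(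
--                 x=col * SWATCH_SIZE,
--                 y=row * SWATCH_SIZE,
--                 width=SWATCH_SIZE,
--                 height=SWATCH_SIZE,
--                 color=color,
--             )
--         )
--         col = col + 1
--         if col == SWATCH_ROW:
--             col = 0
--             row = row + 1
--
--     return rects
-- ===== SOURCE B (Python) =====
-- SWATCH_ROW = 8
--
-- SWATCH_SIZE = 32
--
-- RECT_TEMPLATE = '<rect x="{x}" y="{y}" width="{width}" ' + \
--     'height="{height}" stroke="none" fill="{color}"/>'
--
-- def _grid(rows):
--     """All (x, y) swatch positions of a full grid with the given number of rows."""
--     return [(col * SWATCH_SIZE, row * SWATCH_SIZE)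
--             for row in range(rows) for col in range(SWATCH_ROW)]
--
-- def make_svg_rects(colors):
--     """Creates a list of SVG rectangle elements as strings."""
--     colors = list(colors)
--     rows = (len(colors) + SWATCH_ROW - 1) // SWATCH_ROW
--     return [RECT_TEMPLATE.format(x=x, y=y, width=SWATCH_SIZE,
--                                  height=SWATCH_SIZE, color=color)
--             for (x, y), color in zip(_grid(rows), colors)]
-- ===== Notes on version B (the rewrite author's own statement) =====
-- stated objective: alternative
-- what changed: Replaces the single element-wise loop with mutable col/row counters and a reset branch by a two-stage pipeline: first generate the full grid of (x,y) positions for ceil(n/8) rows, then zip the positions with the colors and format each pair.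
import Mathlib
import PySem

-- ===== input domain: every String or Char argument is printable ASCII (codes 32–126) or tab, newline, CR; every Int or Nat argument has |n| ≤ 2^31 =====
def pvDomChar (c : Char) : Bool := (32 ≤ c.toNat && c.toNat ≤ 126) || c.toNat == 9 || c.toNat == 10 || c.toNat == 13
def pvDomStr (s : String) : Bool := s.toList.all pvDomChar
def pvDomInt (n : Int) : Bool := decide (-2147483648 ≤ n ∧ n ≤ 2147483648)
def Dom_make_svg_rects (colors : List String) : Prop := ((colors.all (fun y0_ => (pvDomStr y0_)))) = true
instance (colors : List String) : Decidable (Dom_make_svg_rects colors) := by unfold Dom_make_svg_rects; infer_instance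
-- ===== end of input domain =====

-- B replaces A's element-wise loop with mutable col/row counters by a two-stage
-- pipeline: generate the grid of (x,y) positions for ceil(n/8) rows, then zip with
-- the colors and format each pair (alternative decomposition; same output).

-- ===== PORT A =====
def pvRect (x y w h : Int) (color : String) : String :=
  "<rect x=\"" ++ PySem.Int.toStr x ++ "\" y=\"" ++ PySem.Int.toStr y ++
  "\" width=\"" ++ PySem.Int.toStr w ++ "\" height=\"" ++ PySem.Int.toStr h ++
  "\" stroke=\"none\" fill=\"" ++ color ++ "\"/>"

def pvLoopA : List String → List String → Int → Int → List String
  | [], rects, _, _ => rects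
  | c :: cs, rects, col, row =>
      let rects' := rects ++ [pvRect (col * 32) (row * 32) 32 32 c]
      let col' := col + 1
      if col' = 8 then pvLoopA cs rects' 0 (row + 1)
      else pvLoopA cs rects' col' row

def make_svg_rects (colors : List String) : List String :=
  pvLoopA colors [] 0 0

-- ===== PORT B =====
-- _grid: all (x, y) positions of a full grid with the given number of rows
def pvGrid (rows : Int) : List (Int × Int) :=
  (PySem.List.pyRange 0 rows 1).flatMap
    (fun r => (PySem.List.pyRange 0 8 1).map (fun c => (c * 32, r * 32)))

def make_svg_rects_alt (colors : List String) : List String :=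
  ((pvGrid (PySem.Int.floordiv ((colors.length : Int) + 8 - 1) 8)).zip colors).map
    (fun p => pvRect p.1.1 p.1.2 32 32 p.2)

-- ===== PRECONDITION & SPEC =====
def Spec_make_svg_rects (colors : List String) (out : List String) : Prop := out = make_svg_rects_alt colors
instance (colors : List String) (out : List String) : Decidable (Spec_make_svg_rects colors out) := by unfold Spec_make_svg_rects; infer_instance

-- ===== CLAIM (what is proved, stated in full; the proofs are below) =====
def Claim_equal_make_svg_rects : Prop := ∀ (colors : List String), Dom_make_svg_rects colors → Spec_make_svg_rects colors (make_svg_rects colors)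

-- ===== LEMMAS AND PROOFS =====

-- the common characterisation: element at global index i sits in cell (i % 8, i // 8)
def pvCell (p : Int × String) : String :=
  pvRect (PySem.Int.mod p.1 8 * 32) (PySem.Int.floordiv p.1 8 * 32) 32 32 p.2

theorem pvLoopA_inv (cs : List String) : ∀ (acc : List String) (i : Int), 0 ≤ i →
    pvLoopA cs acc (PySem.Int.mod i 8) (PySem.Int.floordiv i 8)
      = acc ++ (PySem.List.enumerate cs i).map pvCell := by
  induction cs with
  | nil => intro acc i hi; simp [pvLoopA, PySem.List.enumerate_nil]
  | cons c cs ih =>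
    intro acc i hi
    rw [PySem.List.enumerate_cons]
    have h8 : (0:Int) < 8 := by norm_num
    rw [show (PySem.Int.mod i 8) = i % 8 from PySem.Int.mod_eq_emod_of_pos h8,
        show (PySem.Int.floordiv i 8) = i / 8 from PySem.Int.floordiv_eq_ediv_of_pos h8]
    simp only [pvLoopA, List.map_cons]
    by_cases hc : i % 8 + 1 = 8
    · rw [if_pos hc]
      have h1 : (0:Int) = PySem.Int.mod (i + 1) 8 := by
        rw [PySem.Int.mod_eq_emod_of_pos h8]; omega
      have h2 : i / 8 + 1 = PySem.Int.floordiv (i + 1) 8 := by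
        rw [PySem.Int.floordiv_eq_ediv_of_pos h8]; omega
      rw [h1, h2, ih _ (i + 1) (by omega)]
      simp [pvCell]
    · rw [if_neg hc]
      have h1 : i % 8 + 1 = PySem.Int.mod (i + 1) 8 := by
        rw [PySem.Int.mod_eq_emod_of_pos h8]; omega
      have h2 : i / 8 = PySem.Int.floordiv (i + 1) 8 := by
        rw [PySem.Int.floordiv_eq_ediv_of_pos h8]; omega
      rw [h1, h2, ih _ (i + 1) (by omega)]
      have h3 : (i + 1) / 8 = i / 8 := by omega
      simp [pvCell, h3]

-- the grid, flattened, places index i at cell (i % 8, i // 8)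
theorem pvGrid_char (R : Nat) :
    pvGrid (R : Int) = (PySem.List.pyRange 0 (8 * (R : Int)) 1).map
      (fun i => (i % 8 * 32, i / 8 * 32)) := by
  induction R with
  | zero => simp [pvGrid, PySem.List.pyRange_one_eq_nil (le_refl 0)]
  | succ R ih =>
    unfold pvGrid at ih ⊢
    push_cast
    rw [PySem.List.pyRange_one_succ_right (by positivity : (0:Int) ≤ R),
        List.flatMap_append, ih,
        show (8:Int) * ((R:Int) + 1) = 8 * R + 8 by ring,
        PySem.List.pyRange_one_append 0 (8 * (R:Int)) (8 * (R:Int) + 8)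
          (by positivity) (by omega),
        List.map_append]
    congr 1
    simp only [List.flatMap_cons, List.flatMap_nil, List.append_nil]
    rw [PySem.List.pyRange_one, PySem.List.pyRange_one]
    rw [show ((8:Int) * R + 8 - 8 * R).toNat = 8 by omega,
        show ((8:Int) - 0).toNat = 8 by omega]
    rw [List.map_map, List.map_map]
    apply List.map_congr_left
    intro k hk
    have hk8 : (k : Int) < 8 := by exact_mod_cast List.mem_range.mp hk
    simp only [Function.comp_apply, Prod.mk.injEq]
    constructor <;> omega

-- ===== VERDICT (by name: the statement is the Claim_ definition above) =====
theorem make_svg_rects_spec : Claim_equal_make_svg_rects := by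
  intro colors _
  unfold Spec_make_svg_rects make_svg_rects make_svg_rects_alt
  have h8 : (0:Int) < 8 := by norm_num
  have hA := pvLoopA_inv colors [] 0 (le_refl 0)
  rw [show pvLoopA colors [] 0 0
        = pvLoopA colors [] (PySem.Int.mod 0 8) (PySem.Int.floordiv 0 8) from by
      rw [PySem.Int.mod_eq_emod_of_pos h8, PySem.Int.floordiv_eq_ediv_of_pos h8]; norm_num,
      hA, List.nil_append]
  have hdiv : PySem.Int.floordiv ((colors.length : Int) + 8 - 1) 8
      = ((colors.length : Int) + 7) / 8 := by
    rw [PySem.Int.floordiv_eq_ediv_of_pos h8]; ring_nf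
  have hrnn : 0 ≤ ((colors.length : Int) + 7) / 8 :=
    Int.ediv_nonneg (by positivity) (by norm_num)
  have hR : (((((colors.length : Int) + 7) / 8).toNat : Int))
      = ((colors.length : Int) + 7) / 8 := Int.toNat_of_nonneg hrnn
  rw [hdiv, ← hR, pvGrid_char]
  have hge : (colors.length : Int) ≤ 8 * ((((colors.length : Int) + 7) / 8).toNat : Int) := by
    rw [hR]; omega
  apply List.ext_getElem
  · simp [PySem.List.length_pyRange_one]
    omega
  · intro i h1 h2
    have hi : i < colors.length := by
      simpa [PySem.List.length_enumerate] using h1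
    have hi2 : i < ((8 * ((((colors.length : Int) + 7) / 8).toNat : Int) - 0).toNat) := by
      omega
    simp only [List.getElem_map, List.getElem_zip, PySem.List.getElem_enumerate,
      PySem.List.getElem_pyRange_one, pvCell]
    rw [PySem.Int.mod_eq_emod_of_pos h8, PySem.Int.floordiv_eq_ediv_of_pos h8]
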